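-- pv_equiv track=rewrite | github.com/C4T-BuT-S4D/bricsctf-2023-stage1 | tasks/ppc/gif0day/solve/solve.py | gen_options
-- ===== SOURCE A (Python) =====
-- import string
-- from typing import Iterator, Iterable
--
-- def options_(c: str) -> Iterable[str]:
--     if c == '_':
--         alpha = list(string.ascii_letters + string.digits)
--         # 'g' hack (g is most common unrecognized char)
--         g_ind = alpha.index('g')
--         alpha[0], alpha[g_ind] = alpha[g_ind], alpha[0]
--         return list(alpha)
--
--     uq = set()
--     sets = ({'0', 'o', 'O'},
--             {'1', 'l', 'i', 'I', 'j'},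
--             {'z', '2'},
--             {'9', 'g', 'q'},
--             {'b', 'j', 'J'},
--             {'v', 'y', 'V', 'Y'},
--             {'r', 'f'},
--             {'h', 'n'},
--             {'5', 's', 'S'},
--             {'8', 'B', 'g'})
--     for s in sets:
--         if c not in s:
--             continue
--         for v in s:
--             uq.add(v)
--     uq.add(c.upper())
--     uq.add(c.lower())
--     return uq
--
-- def gen_options(x: str, pos: int) -> Iterator[str]:
--     if pos >= len(x):
--         yield ''
--         return
--
--     opts = options_(x[pos])
--     for opt in opts:
--         for v in gen_options(x, pos + 1):
--             yield opt + v
--     return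
-- ===== SOURCE B (Python) =====
-- import string
-- import itertools
-- from typing import Iterator, Iterable
--
--
-- def options_(c: str) -> Iterable[str]:
--     if c == '_':
--         alpha = list(string.ascii_letters + string.digits)
--         # 'g' hack (g is most common unrecognized char)
--         g_ind = alpha.index('g')
--         alpha[0], alpha[g_ind] = alpha[g_ind], alpha[0]
--         return list(alpha)
--
--     uq = set()
--     sets = ({'0', 'o', 'O'},
--             {'1', 'l', 'i', 'I', 'j'},
--             {'z', '2'},
--             {'9', 'g', 'q'},
--             {'b', 'j', 'J'},
--             {'v', 'y', 'V', 'Y'},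
--             {'r', 'f'},
--             {'h', 'n'},
--             {'5', 's', 'S'},
--             {'8', 'B', 'g'})
--     for s in sets:
--         if c not in s:
--             continue
--         for v in s:
--             uq.add(v)
--     uq.add(c.upper())
--     uq.add(c.lower())
--     return uq
--
--
-- def gen_options(x: str, pos: int) -> Iterator[str]:
--     # iterative cartesian product: one options_ call per position, no recursion
--     opts_list = [list(options_(x[i])) for i in range(pos, len(x))]
--     for combo in itertools.product(*opts_list):
--         yield ''.join(combo)
-- ===== Notes on version B (the rewrite author's own statement) =====
-- stated objective: alternative
-- what changed: gen_options' per-character recursion (which re-runs options_ and regenerates the whole suffix generator once per emitted prefix) is replaced by one options_ call per position followed by an iterative cartesian product (itertools.product) whose rightmost-fastest order matches the nested recursion, joining each tuple once.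
import Mathlib
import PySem

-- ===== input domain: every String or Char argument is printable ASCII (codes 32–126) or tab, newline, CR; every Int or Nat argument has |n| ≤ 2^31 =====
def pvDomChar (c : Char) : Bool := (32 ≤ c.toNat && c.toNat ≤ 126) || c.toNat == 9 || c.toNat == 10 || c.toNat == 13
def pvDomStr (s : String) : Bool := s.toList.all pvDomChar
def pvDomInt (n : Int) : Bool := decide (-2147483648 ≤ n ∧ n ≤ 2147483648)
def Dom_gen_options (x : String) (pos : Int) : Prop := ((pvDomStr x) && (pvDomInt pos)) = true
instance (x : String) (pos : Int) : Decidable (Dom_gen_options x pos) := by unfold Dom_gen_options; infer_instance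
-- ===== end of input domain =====

-- B replaces A's per-position recursion (which re-runs options_ and the whole sub-generator
-- for every prefix) by one options_ call per position followed by an iterative cartesian
-- product (itertools.product); the yielded sequence is identical.

-- ===== PORT A =====
-- module helper options_ (used verbatim by both the A and B side, as in the Python module);
-- Python's set literals / set() are modeled by PySem.Set in textual insertion order
def options_ (c : String) : List String :=
  if c == "_" then
    -- alpha = list(string.ascii_letters + string.digits)
    let alpha : List String :=
      "abcdefghijklmnopqrstuvwxyzABCDEFGHIJKLMNOPQRSTUVWXYZ0123456789".toList.map
        String.singleton
    match PySem.List.index? alpha "g" with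
    | none => []  -- ValueError from .index: unreachable, "g" is in alpha
    | some g_ind =>
        -- alpha[0], alpha[g_ind] = alpha[g_ind], alpha[0]
        (alpha.set 0 (alpha.getD g_ind "")).set g_ind (alpha.getD 0 "")
  else
    let sets : List (PySem.Set String) :=
      [PySem.Set.ofList ["0", "o", "O"],
       PySem.Set.ofList ["1", "l", "i", "I", "j"],
       PySem.Set.ofList ["z", "2"],
       PySem.Set.ofList ["9", "g", "q"],
       PySem.Set.ofList ["b", "j", "J"],
       PySem.Set.ofList ["v", "y", "V", "Y"],
       PySem.Set.ofList ["r", "f"],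
       PySem.Set.ofList ["h", "n"],
       PySem.Set.ofList ["5", "s", "S"],
       PySem.Set.ofList ["8", "B", "g"]]
    let uq : PySem.Set String :=
      sets.foldl
        (fun uq s => if PySem.Set.contains s c then PySem.Set.update uq s else uq)
        PySem.Set.empty
    PySem.Set.add (PySem.Set.add uq (PySem.Str.upper c)) (PySem.Str.lower c)

def gen_options (x : String) (pos : Int) : List String :=
  if _h : pos ≥ PySem.Str.len x then [""]
  else
    match PySem.Str.pyGet? x pos with
    | none => []  -- IndexError on x[pos]: excluded by Pre_gen_options
    | some ch =>
        (options_ (String.singleton ch)).foldl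
          (fun acc opt => acc ++ (gen_options x (pos + 1)).map (fun v => opt ++ v)) []
termination_by (PySem.Str.len x - pos).toNat
decreasing_by
  simp only [PySem.Str.len] at *
  omega

-- ===== PORT B =====
-- itertools.product, rightmost varying fastest (one cartesian-product step per iterable)
def productR : List (List String) → List (List String)
  | [] => [[]]
  | opts :: rest => opts.flatMap (fun o => (productR rest).map (fun combo => o :: combo))

def gen_options_alt (x : String) (pos : Int) : List String :=
  -- opts_list = [list(options_(x[i])) for i in range(pos, len(x))]
  -- (an out-of-range x[i] — IndexError, outside Pre_gen_options — is modeled by a default char)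
  let opts_list : List (List String) :=
    (PySem.List.pyRange pos (PySem.Str.len x)).map
      (fun i => options_ (String.singleton ((PySem.Str.pyGet? x i).getD ' ')))
  (productR opts_list).map (fun combo => PySem.Str.join "" combo)

-- ===== PRECONDITION & SPEC =====
-- Pre_ excludes exactly the inputs where Python A raises IndexError: pos < -len(x)
def Pre_gen_options (x : String) (pos : Int) : Prop := -(PySem.Str.len x) ≤ pos
instance (x : String) (pos : Int) : Decidable (Pre_gen_options x pos) := by
  unfold Pre_gen_options; infer_instance
def pvWitness_gen_options : String × Int := ("ab", 0)

def Spec_gen_options (x : String) (pos : Int) (out : List String) : Prop :=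
  out = gen_options_alt x pos
instance (x : String) (pos : Int) (out : List String) : Decidable (Spec_gen_options x pos out) := by
  unfold Spec_gen_options; infer_instance

-- ===== CLAIM (what is proved, stated in full; the proofs are below) =====
def Claim_equal_gen_options : Prop :=
  ∀ (x : String) (pos : Int), Dom_gen_options x pos → Pre_gen_options x pos →
    Spec_gen_options x pos (gen_options x pos)

-- ===== LEMMAS AND PROOFS =====

theorem pv_flatten_intersperse_nil (l : List (List Char)) :
    (List.intersperse ([] : List Char) l).flatten = l.flatten := by
  induction l with
  | nil => rfl
  | cons a t ih =>
    cases t with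
    | nil => rfl
    | cons b t2 => simp_all [List.intersperse]

theorem pv_join_empty_cons (s : String) (l : List String) :
    PySem.Str.join "" (s :: l) = s ++ PySem.Str.join "" l := by
  apply String.toList_inj.mp
  simp [PySem.Str.join, PySem.Chars.join, List.intercalate, pv_flatten_intersperse_nil]

theorem pv_join_empty_nil : PySem.Str.join "" ([] : List String) = "" := by decide

-- one unfolding step of gen_options_alt at a position that is still inside the string
theorem pv_alt_step (x : String) (pos : Int) (ch : Char)
    (hlt : pos < PySem.Str.len x) (hch : PySem.Str.pyGet? x pos = some ch) :
    gen_options_alt x pos =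
      (options_ (String.singleton ch)).flatMap
        (fun opt => (gen_options_alt x (pos + 1)).map (fun v => opt ++ v)) := by
  unfold gen_options_alt
  rw [PySem.List.pyRange_one_cons hlt]
  simp only [List.map_cons, hch, Option.getD_some, productR]
  rw [List.map_flatMap]
  congr 1
  funext o
  simp [Function.comp, pv_join_empty_cons]

theorem pv_main (x : String) (n : Nat) :
    ∀ (pos : Int), -(PySem.Str.len x) ≤ pos → (PySem.Str.len x - pos).toNat = n →
      gen_options x pos = gen_options_alt x pos := by
  induction n with
  | zero =>
    intro pos hpre hn
    have hge : pos ≥ PySem.Str.len x := by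
      simp only [PySem.Str.len] at hpre hn ⊢; omega
    rw [gen_options, dif_pos hge]
    unfold gen_options_alt
    rw [PySem.List.pyRange_one_eq_nil hge]
    simp [productR, pv_join_empty_nil]
  | succ n ih =>
    intro pos hpre hn
    have hlt : pos < PySem.Str.len x := by
      simp only [PySem.Str.len] at hpre hn ⊢; omega
    obtain ⟨ch, hch⟩ : ∃ ch, PySem.Str.pyGet? x pos = some ch := by
      cases hcase : PySem.Str.pyGet? x pos with
      | some c => exact ⟨c, rfl⟩
      | none =>
        exfalso
        have := (PySem.List.pyGet?_eq_none_iff (xs := x.toList) (i := pos)).mp (by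
          simpa [PySem.Str.pyGet?, PySem.Chars.pyGet?_eq_listPyGet?] using hcase)
        apply this
        constructor <;> (simp only [PySem.Str.len] at hpre hlt; omega)
    rw [pv_alt_step x pos ch hlt hch]
    rw [← ih (pos + 1) (by omega) (by simp only [PySem.Str.len] at hn ⊢; omega)]
    rw [gen_options, dif_neg (by omega), hch]
    simp [List.flatMap]

-- ===== VERDICT (by name: the statement is the Claim_ definition above) =====
theorem gen_options_spec : Claim_equal_gen_options := by
  intro x pos _hdom hpre
  unfold Spec_gen_options
  exact pv_main x (PySem.Str.len x - pos).toNat pos hpre rfl
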